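-- pv_equiv track=rewrite | github.com/CassandraYang/Circuit-Simulator | hw6_circuit_starter/hw6_circuit.py | getTokenBounds
-- ===== SOURCE A (Python) =====
-- def getTokenBounds(expr, start):
--     begin = None
--     end = None
--     while end == None:
--         if begin == None and expr[start] != ' ':
--             begin = start
--         elif begin != None and (start == len(expr) or expr[start] == ' '):
--             end = start - 1
--         start += 1
--     return [begin, end]
-- ===== SOURCE B (Python) =====
-- def getTokenBounds(expr, start):
--     i = start
--     while expr[i] == ' ':
--         i += 1
--     begin = i
--     j = begin
--     while j < len(expr) and expr[j] != ' ':
--         j += 1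
--     return [begin, j - 1]
-- ===== Notes on version B (the rewrite author's own statement) =====
-- stated objective: simpler
-- what changed: Replaces A's single flag-driven loop with Optional begin/end sentinel state by two explicit phases: a space-skipping scan that finds the token's begin, then a bounded scan to the first space or end of string; no sentinel state.
import Mathlib
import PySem

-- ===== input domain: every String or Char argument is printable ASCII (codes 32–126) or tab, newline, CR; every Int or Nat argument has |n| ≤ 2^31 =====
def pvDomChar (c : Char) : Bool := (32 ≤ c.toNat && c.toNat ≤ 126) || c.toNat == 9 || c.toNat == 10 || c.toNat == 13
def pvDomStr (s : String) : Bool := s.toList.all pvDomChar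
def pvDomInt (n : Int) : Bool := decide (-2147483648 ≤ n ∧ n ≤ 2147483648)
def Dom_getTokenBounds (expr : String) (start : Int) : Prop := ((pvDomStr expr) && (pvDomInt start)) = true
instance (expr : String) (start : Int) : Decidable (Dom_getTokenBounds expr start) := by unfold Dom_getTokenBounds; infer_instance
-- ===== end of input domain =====

-- B replaces A's single flag-driven loop (begin/end sentinel state) by two explicit scans:
-- skip spaces to find begin, then scan to the token's end; same return value wherever A returns.

-- ===== PORT A =====
-- A's while-loop, step for step: state is (start, begin?); the loop runs while end is unset.
-- Python raises IndexError exactly where pyGet? is none; the port returns [] there (excluded by Pre_).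
-- fuel is a totality device only: the wrapper passes enough for every reachable iteration.
def getTokenBoundsLoop (cs : List Char) : Nat → Int → Option Int → List Int
  | 0, _, _ => []
  | fuel + 1, start, begin? =>
    match begin? with
    | none =>
      match PySem.List.pyGet? cs start with
      | none => []          -- IndexError in Python
      | some c =>
        if c ≠ ' ' then getTokenBoundsLoop cs fuel (start + 1) (some start)
        else getTokenBoundsLoop cs fuel (start + 1) none
    | some b =>
      if start = (cs.length : Int) then [b, start - 1]
      else
        match PySem.List.pyGet? cs start with
        | none => []        -- IndexError in Python (unreachable from A's reachable states)
        | some c =>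
          if c = ' ' then [b, start - 1]
          else getTokenBoundsLoop cs fuel (start + 1) (some b)

def getTokenBounds (expr : String) (start : Int) : List Int :=
  getTokenBoundsLoop expr.toList (((expr.toList.length : Int) + 1 - start).toNat + 1) start none

-- ===== PORT B =====
-- phase 1: i = start; while expr[i] == ' ': i += 1   (none = IndexError, excluded by Pre_)
def gtbSkip (cs : List Char) : Nat → Int → Option Int
  | 0, _ => none
  | fuel + 1, i =>
    match PySem.List.pyGet? cs i with
    | none => none
    | some c => if c = ' ' then gtbSkip cs fuel (i + 1) else some i

-- phase 2: j = begin; while j < len(expr) and expr[j] != ' ': j += 1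
def gtbScan (cs : List Char) : Nat → Int → Int
  | 0, j => j
  | fuel + 1, j =>
    if j < (cs.length : Int) then
      match PySem.List.pyGet? cs j with
      | none => j           -- IndexError in Python (unreachable from B's reachable states)
      | some c => if c ≠ ' ' then gtbScan cs fuel (j + 1) else j
    else j

def getTokenBounds_alt (expr : String) (start : Int) : List Int :=
  match gtbSkip expr.toList (((expr.toList.length : Int) + 1 - start).toNat + 1) start with
  | none => []              -- IndexError in Python (excluded by Pre_)
  | some b => [b, gtbScan expr.toList (((expr.toList.length : Int) + 1 - b).toNat + 1) b - 1]

-- ===== PRECONDITION & SPEC =====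
-- Pre_ = exactly the inputs on which Python's A returns (no IndexError): the scan from
-- `start` (Python negative indices count from the end) must meet a non-space character
-- before the index reaches len(expr).
def Pre_getTokenBounds (expr : String) (start : Int) : Prop :=
  (0 ≤ start ∧ start < (expr.toList.length : Int) ∧
     (expr.toList.drop start.toNat).any (· ≠ ' ') = true) ∨
  (start < 0 ∧ -(expr.toList.length : Int) ≤ start ∧ expr.toList.any (· ≠ ' ') = true)
instance (expr : String) (start : Int) : Decidable (Pre_getTokenBounds expr start) := by
  unfold Pre_getTokenBounds; infer_instance

def pvWitness_getTokenBounds : String × Int := ("  ab", 1)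

def Spec_getTokenBounds (expr : String) (start : Int) (out : List Int) : Prop := out = getTokenBounds_alt expr start
instance (expr : String) (start : Int) (out : List Int) : Decidable (Spec_getTokenBounds expr start out) := by unfold Spec_getTokenBounds; infer_instance

-- ===== CLAIM (what is proved, stated in full; the proofs are below) =====
def Claim_equal_getTokenBounds : Prop := ∀ (expr : String) (start : Int), Dom_getTokenBounds expr start → Pre_getTokenBounds expr start → Spec_getTokenBounds expr start (getTokenBounds expr start)

-- ===== LEMMAS AND PROOFS =====

-- a valid index gives `some`
theorem pyGet?_isSome_of_range (cs : List Char) (i : Int)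
    (h1 : -(cs.length : Int) ≤ i) (h2 : i < (cs.length : Int)) :
    ∃ c, PySem.List.pyGet? cs i = some c := by
  cases hc : PySem.List.pyGet? cs i with
  | none =>
    have := (PySem.List.pyGet?_eq_none_iff cs i).1 hc
    exact absurd (by simp [PySem.Raise.InRange]; omega) this
  | some c => exact ⟨c, rfl⟩

theorem pyGet?_range_of_some (cs : List Char) (i : Int) (c : Char)
    (h : PySem.List.pyGet? cs i = some c) :
    -(cs.length : Int) ≤ i ∧ i < (cs.length : Int) := by
  have hr : PySem.Raise.InRange cs.length i := by
    by_contra hc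
    exact absurd h (by simp [(PySem.List.pyGet?_eq_none_iff _ _).2 hc])
  simp [PySem.Raise.InRange] at hr; omega

-- A's loop after begin is set = B's end-scan, on the indices A can reach there (any sufficient fuels).
theorem loopA_some_eq_scan (cs : List Char) (b : Int) :
    ∀ (f1 f2 : Nat) (j : Int),
      ((cs.length : Int) + 1 - j).toNat < f1 → ((cs.length : Int) + 1 - j).toNat < f2 →
      -(cs.length : Int) ≤ j → j ≤ (cs.length : Int) →
      getTokenBoundsLoop cs f1 j (some b) = [b, gtbScan cs f2 j - 1] := by
  intro f1
  induction f1 with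
  | zero => intro f2 j h1 h2 hlo hhi; omega
  | succ f1' ih =>
    intro f2 j h1 h2 hlo hhi
    cases f2 with
    | zero => omega
    | succ f2' =>
      by_cases hj : j = (cs.length : Int)
      · simp [getTokenBoundsLoop, gtbScan, hj]
      · have hjlt : j < (cs.length : Int) := by omega
        obtain ⟨c, hc⟩ := pyGet?_isSome_of_range cs j hlo hjlt
        by_cases hsp : c = ' '
        · simp [getTokenBoundsLoop, gtbScan, hj, hjlt, hc, hsp]
        · simp only [getTokenBoundsLoop, gtbScan, if_neg hj, if_pos hjlt, hc,
            if_neg hsp, if_pos hsp]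
          exact ih f2' (j + 1) (by omega) (by omega) (by omega) (by omega)

-- A's whole loop (begin unset) = B: skip the spaces, then scan to the token's end.
theorem loopA_none_eq_alt (cs : List Char) :
    ∀ (f1 f2 : Nat) (i : Int),
      ((cs.length : Int) + 1 - i).toNat < f1 → ((cs.length : Int) + 1 - i).toNat < f2 →
      getTokenBoundsLoop cs f1 i none =
        match gtbSkip cs f2 i with
        | none => []
        | some b => [b, gtbScan cs (((cs.length : Int) + 1 - b).toNat + 1) b - 1] := by
  intro f1
  induction f1 with
  | zero => intro f2 i h1 h2; omega
  | succ f1' ih =>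
    intro f2 i h1 h2
    cases f2 with
    | zero => omega
    | succ f2' =>
    cases hc : PySem.List.pyGet? cs i with
    | none => simp [getTokenBoundsLoop, gtbSkip, hc]
    | some c =>
      have hlt := pyGet?_range_of_some cs i c hc
      by_cases hsp : c = ' '
      · simp only [getTokenBoundsLoop, gtbSkip, hc, if_pos hsp, if_neg (by simp [hsp] :
          ¬c ≠ ' ')]
        exact ih f2' (i + 1) (by omega) (by omega)
      · simp only [getTokenBoundsLoop, gtbSkip, hc, if_neg hsp, if_pos hsp]
        have hscan : gtbScan cs (((cs.length : Int) + 1 - i).toNat + 1) i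
            = gtbScan cs (((cs.length : Int) + 1 - i).toNat) (i + 1) := by
          simp [gtbScan, hlt.2, hc, hsp]
        rw [hscan]
        exact loopA_some_eq_scan cs i f1' _ (i + 1) (by omega) (by omega) (by omega) (by omega)

-- ===== VERDICT (by name: the statement is the Claim_ definition above) =====
theorem getTokenBounds_spec : Claim_equal_getTokenBounds := by
  intro expr start _ _
  unfold Spec_getTokenBounds getTokenBounds getTokenBounds_alt
  exact loopA_none_eq_alt expr.toList _ _ start (by omega) (by omega)
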